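-- pv_equiv track=rewrite | github.com/manas-17045/LeetcodeSolutions | Leetcode 3801-3900/3826/3826.py | minPartitionScore
-- ===== SOURCE A (Python) =====
-- def minPartitionScore(nums: list[int], k: int) -> int:
--     """
--     Calculates the minimum partition score by dividing the array into k non-empty subarrays.
--
--     :param nums: List of integers representing the array to be partitioned.
--     :param k: Integer representing the number of partitions.
--     :return: Integer representing the minimum total score.
--     """
--     n = len(nums)
--     prefixSum = [0] * (n + 1)
--     for i in range(n):
--         prefixSum[i + 1] = prefixSum[i] + nums[i]
--
--     dp = [0] * (n + 1)
--     for i in range(1, n + 1):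
--         val = prefixSum[i]
--         dp[i] = val * (val + 1) // 2
--
--     def compute(prevDp, nextDp, left, right, optL, optR):
--         if left > right:
--             return
--
--         mid = (left + right) // 2
--         minScore = float('inf')
--         bestSplit = -1
--
--         limit = min(mid - 1, optR)
--
--         for i in range(optL, limit + 1):
--             val = prefixSum[mid] - prefixSum[i]
--             currentScore = prevDp[i] + val * (val + 1) // 2
--             if currentScore < minScore:
--                 minScore = currentScore
--                 bestSplit = i
--
--         nextDp[mid] = minScore
--
--         compute(prevDp, nextDp, left, mid - 1, optL, bestSplit)
--         compute(prevDp, nextDp, mid + 1, right, bestSplit, optR)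
--
--     for i in range(2, k + 1):
--         nextDp = [0] * (n + 1)
--         compute(dp, nextDp, i, n, i - 1, n - 1)
--         dp = nextDp
--
--     return dp[n]
-- ===== SOURCE B (Python) =====
-- def minPartitionScore(nums: list[int], k: int) -> int:
--     n = len(nums)
--     prefix = [0]
--     acc = 0
--     for x in nums:
--         acc += x
--         prefix.append(acc)
--
--     def cost(l, r):
--         v = prefix[r] - prefix[l]
--         return v * (v + 1) // 2
--
--     dp = [cost(0, i) for i in range(n + 1)]
--     for j in range(2, k + 1):
--         nextDp = [0] * (n + 1)
--         stack = [(j, n, j - 1, n - 1)]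
--         while stack:
--             left, right, optL, optR = stack.pop()
--             if left > right:
--                 continue
--             mid = (left + right) // 2
--             limit = min(mid - 1, optR)
--             best = min(range(optL, limit + 1), key=lambda l: dp[l] + cost(l, mid))
--             nextDp[mid] = dp[best] + cost(best, mid)
--             stack.append((mid + 1, right, best, optR))
--             stack.append((left, mid - 1, optL, best))
--         dp = nextDp
--     return dp[n]
-- ===== Notes on version B (the rewrite author's own statement) =====
-- stated objective: alternative
-- what changed: The divide-and-conquer optimization is re-expressed iteratively: an explicit work-stack of (left,right,optL,optR) tasks replaces the recursive compute(), the best split is found with min(range(...), key=...) instead of a manual strict-< tracking loop with a float('inf') sentinel, and the base DP row is built by comprehension from a shared cost() helper.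
import Mathlib
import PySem

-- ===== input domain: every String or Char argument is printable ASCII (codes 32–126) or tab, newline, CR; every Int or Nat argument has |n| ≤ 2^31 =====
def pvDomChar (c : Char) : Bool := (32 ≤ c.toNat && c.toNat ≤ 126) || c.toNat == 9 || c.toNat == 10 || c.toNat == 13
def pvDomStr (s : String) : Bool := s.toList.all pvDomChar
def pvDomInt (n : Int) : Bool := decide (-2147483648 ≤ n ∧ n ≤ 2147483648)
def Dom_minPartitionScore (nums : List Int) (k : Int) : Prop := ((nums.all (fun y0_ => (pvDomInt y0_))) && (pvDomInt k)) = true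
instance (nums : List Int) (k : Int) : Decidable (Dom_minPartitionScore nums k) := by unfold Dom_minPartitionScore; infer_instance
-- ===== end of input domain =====

-- B re-expresses A's divide-and-conquer optimization iteratively: an explicit work-stack of tasks
-- replaces the recursion and min(range, key=...) replaces the manual strict-< tracking loop; same cost
-- formula and same returned value ("alternative" objective, no speed claim).

-- ===== PORT A =====

-- recursive helper 'compute(prevDp, nextDp, left, right, optL, optR)' of A; the float('inf') sentinel
-- minScore is ported as 'Option Int' (none = inf); in the (unreachable in A's calls) empty-loop case
-- Python would store the float inf into nextDp — the port stores 0 there (that cell is never read).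
def aCompute (prefixSum prevDp : List Int) (nextDp : List Int) (left right optL optR : Int) : List Int :=
  if left > right then nextDp
  else
    let mid := PySem.Int.floordiv (left + right) 2
    let limit := min (mid - 1) optR
    let st := (PySem.List.pyRange optL (limit + 1) 1).foldl
      (fun (s : Option Int × Int) i =>
        let val := PySem.List.pyGetD prefixSum mid 0 - PySem.List.pyGetD prefixSum i 0
        let currentScore := PySem.List.pyGetD prevDp i 0 + PySem.Int.floordiv (val * (val + 1)) 2
        match s.1 with
        | none => (some currentScore, i)
        | some m => if currentScore < m then (some currentScore, i) else s)
      ((none : Option Int), (-1 : Int))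
    let nextDp' := PySem.List.pySetD nextDp mid (st.1.getD 0)
    let nextDp'' := aCompute prefixSum prevDp nextDp' left (mid - 1) optL st.2
    aCompute prefixSum prevDp nextDp'' (mid + 1) right st.2 optR
termination_by (right + 1 - left).toNat
decreasing_by
  · have h2 := PySem.Int.floordiv_two_mid_bounds (show left ≤ right by omega)
    omega
  · have h2 := PySem.Int.floordiv_two_mid_bounds (show left ≤ right by omega)
    omega

def minPartitionScore (nums : List Int) (k : Int) : Int :=
  let n := nums.length
  let prefixSum := (PySem.List.pyRange 0 (n : Int) 1).foldl
    (fun ps i => PySem.List.pySetD ps (i + 1) (PySem.List.pyGetD ps i 0 + PySem.List.pyGetD nums i 0))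
    (List.replicate (n + 1) 0)
  let dp := (PySem.List.pyRange 1 ((n : Int) + 1) 1).foldl
    (fun dp i =>
      let val := PySem.List.pyGetD prefixSum i 0
      PySem.List.pySetD dp i (PySem.Int.floordiv (val * (val + 1)) 2))
    (List.replicate (n + 1) 0)
  let dp := (PySem.List.pyRange 2 (k + 1) 1).foldl
    (fun dp i => aCompute prefixSum dp (List.replicate (n + 1) 0) i (n : Int) (i - 1) ((n : Int) - 1))
    dp
  PySem.List.pyGetD dp (n : Int) 0

-- ===== PORT B =====

-- helper 'cost(l, r)' of B
def bCost (pre : List Int) (l r : Int) : Int :=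
  let v := PySem.List.pyGetD pre r 0 - PySem.List.pyGetD pre l 0
  PySem.Int.floordiv (v * (v + 1)) 2

-- B's 'while stack:' loop; the list head is the top of the stack.  'min' of an empty range would be a
-- Python ValueError — unreachable for the tasks B pushes — the port takes '.getD 0' there.
def bStack (pre dp : List Int) (nextDp : List Int) (stack : List (Int × Int × Int × Int)) : List Int :=
  match stack with
  | [] => nextDp
  | (left, right, optL, optR) :: rest =>
    if left > right then bStack pre dp nextDp rest
    else
      let mid := PySem.Int.floordiv (left + right) 2
      let limit := min (mid - 1) optR
      let best := (PySem.List.min? (PySem.List.pyRange optL (limit + 1) 1)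
        (fun l => PySem.List.pyGetD dp l 0 + bCost pre l mid)).getD 0
      let nextDp' := PySem.List.pySetD nextDp mid (PySem.List.pyGetD dp best 0 + bCost pre best mid)
      bStack pre dp nextDp' ((left, mid - 1, optL, best) :: (mid + 1, right, best, optR) :: rest)
termination_by ((stack.map (fun t => (t.2.1 + 1 - t.1).toNat)).sum, stack.length)
decreasing_by
  · apply Prod.Lex.right' <;> simp
  · apply Prod.Lex.left
    simp
    omega

def minPartitionScore_alt (nums : List Int) (k : Int) : Int :=
  let n := nums.length
  let pre := (nums.foldl (fun (p : List Int × Int) x => (p.1 ++ [p.2 + x], p.2 + x)) ([0], 0)).1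
  let dp := (PySem.List.pyRange 0 ((n : Int) + 1) 1).map (fun i => bCost pre 0 i)
  let dp := (PySem.List.pyRange 2 (k + 1) 1).foldl
    (fun dp j => bStack pre dp (List.replicate (n + 1) 0) [(j, (n : Int), j - 1, (n : Int) - 1)])
    dp
  PySem.List.pyGetD dp (n : Int) 0

-- ===== PRECONDITION & SPEC =====
def Spec_minPartitionScore (nums : List Int) (k : Int) (out : Int) : Prop := out = minPartitionScore_alt nums k
instance (nums : List Int) (k : Int) (out : Int) : Decidable (Spec_minPartitionScore nums k out) := by unfold Spec_minPartitionScore; infer_instance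

-- ===== CLAIM (what is proved, stated in full; the proofs are below) =====
def Claim_equal_minPartitionScore : Prop := ∀ (nums : List Int) (k : Int), Dom_minPartitionScore nums k → Spec_minPartitionScore nums k (minPartitionScore nums k)

-- ===== LEMMAS AND PROOFS =====

-- reference prefix-sum list: pref a [x0, x1, …] = [a, a+x0, a+x0+x1, …]
def pref (a : Int) : List Int → List Int
  | [] => [a]
  | x :: xs => a :: pref (a + x) xs

theorem length_pref (a : Int) (xs : List Int) : (pref a xs).length = xs.length + 1 := by
  induction xs generalizing a with
  | nil => rfl
  | cons x xs ih => simp [pref, ih]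

theorem pref_getD_zero (a : Int) (xs : List Int) : (pref a xs).getD 0 0 = a := by
  cases xs <;> simp [pref]

theorem pref_getD_succ (a : Int) (xs : List Int) (i : Nat) (h : i < xs.length) :
    (pref a xs).getD (i + 1) 0 = (pref a xs).getD i 0 + xs.getD i 0 := by
  induction xs generalizing a i with
  | nil => simp at h
  | cons x t ih =>
    cases i with
    | zero => simp only [pref, List.getD_cons_succ, List.getD_cons_zero, pref_getD_zero]
    | succ j =>
      simp only [pref, List.getD_cons_succ]
      exact ih _ _ (by simpa using h)

theorem pref_take_one (a : Int) (xs : List Int) : (pref a xs).take 1 = [a] := by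
  cases xs <;> simp [pref]

-- Python 'xs[n] = v' for an in-range nonnegative index is List.set
theorem pySetD_nat (xs : List Int) (n : Nat) (v : Int) (h : n < xs.length) :
    PySem.List.pySetD xs (n : Int) v = xs.set n v := by
  simp [PySem.List.pySetD, PySem.List.pySet?, PySem.List.pyIdx?, h]

-- A's prefix loop, first m steps
theorem aPrefix_inv (nums : List Int) (m : Nat) (hm : m ≤ nums.length) :
    (PySem.List.pyRange 0 (m : Int) 1).foldl
      (fun ps i => PySem.List.pySetD ps (i + 1) (PySem.List.pyGetD ps i 0 + PySem.List.pyGetD nums i 0))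
      (List.replicate (nums.length + 1) 0)
    = (pref 0 nums).take (m + 1) ++ List.replicate (nums.length - m) 0 := by
  induction m with
  | zero =>
    rw [show ((0 : Nat) : Int) = 0 from rfl, PySem.List.pyRange_one_eq_nil (by omega),
        List.foldl_nil, pref_take_one, Nat.sub_zero, List.replicate_succ]
    rfl
  | succ m ih =>
    have hm' : m ≤ nums.length := by omega
    have hlen : (pref 0 nums).length = nums.length + 1 := length_pref 0 nums
    have htk : ((pref 0 nums).take (m + 1)).length = m + 1 := by
      rw [List.length_take]; omega
    have hL : ((pref 0 nums).take (m + 1) ++ List.replicate (nums.length - m) 0).length = nums.length + 1 := by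
      rw [List.length_append, htk, List.length_replicate]; omega
    rw [show ((m + 1 : Nat) : Int) = (m : Int) + 1 by push_cast; ring,
        PySem.List.pyRange_one_succ_right (by positivity), List.foldl_append, ih hm']
    simp only [List.foldl]
    have hget1 : PySem.List.pyGetD ((pref 0 nums).take (m + 1) ++ List.replicate (nums.length - m) 0) (m : Int) 0
        = (pref 0 nums).getD m 0 := by
      rw [PySem.List.pyGetD_natCast, List.getD_append _ _ _ _ (by omega), List.getD_eq_getElem?_getD]
      rw [List.getElem?_take_of_lt (by omega), ← List.getD_eq_getElem?_getD]
    have hget2 : PySem.List.pyGetD nums (m : Int) 0 = nums.getD m 0 := PySem.List.pyGetD_natCast nums m 0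
    rw [hget1, hget2, ← pref_getD_succ 0 nums m (by omega)]
    rw [show ((m : Int) + 1) = ((m + 1 : Nat) : Int) by push_cast; ring]
    rw [pySetD_nat _ _ _ (by omega), List.set_append, if_neg (by omega), htk]
    have hrep : (List.replicate (nums.length - m) (0 : Int)).set ((m + 1) - (m + 1)) ((pref 0 nums).getD (m + 1) 0)
        = (pref 0 nums).getD (m + 1) 0 :: List.replicate (nums.length - (m + 1)) 0 := by
      rw [show nums.length - m = (nums.length - (m + 1)) + 1 by omega, Nat.sub_self, List.replicate_succ, List.set_cons_zero]
    rw [hrep]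
    have hsome : (pref 0 nums)[m + 1]? = some ((pref 0 nums).getD (m + 1) 0) := by
      rw [List.getElem?_eq_getElem (by omega), List.getD_eq_getElem _ _ (by omega)]
    have htake : List.take ((m + 1) + 1) (pref 0 nums)
        = List.take (m + 1) (pref 0 nums) ++ [(pref 0 nums).getD (m + 1) 0] := by
      rw [List.take_add_one, hsome]; rfl
    rw [htake]
    simp

-- A's prefix loop equals pref 0 nums
theorem aPrefix_eq (nums : List Int) :
    (PySem.List.pyRange 0 (nums.length : Int) 1).foldl
      (fun ps i => PySem.List.pySetD ps (i + 1) (PySem.List.pyGetD ps i 0 + PySem.List.pyGetD nums i 0))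
      (List.replicate (nums.length + 1) 0) = pref 0 nums := by
  have h := aPrefix_inv nums nums.length le_rfl
  rw [h, Nat.sub_self, List.replicate_zero, List.append_nil,
      List.take_of_length_le (by rw [length_pref])]

-- B's prefix loop equals pref 0 nums
theorem bPrefix_eq (nums : List Int) :
    ((nums.foldl (fun (p : List Int × Int) x => (p.1 ++ [p.2 + x], p.2 + x)) ([0], 0)).1) = pref 0 nums := by
  have key : ∀ (l : List Int) (xs : List Int) (a : Int),
      (l.foldl (fun (p : List Int × Int) x => (p.1 ++ [p.2 + x], p.2 + x)) (xs ++ [a], a)).1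
      = xs ++ pref a l := by
    intro l
    induction l with
    | nil => intro xs a; simp [pref]
    | cons x t ih =>
      intro xs a
      simp only [List.foldl]
      rw [show xs ++ [a] ++ [a + x] = (xs ++ [a]) ++ [a + x] by simp]
      rw [ih (xs ++ [a]) (a + x)]
      simp [pref]
  have h := key nums [] 0
  simpa using h

-- the two base rows agree
theorem base_eq (nums : List Int) :
    (PySem.List.pyRange 1 ((nums.length : Int) + 1) 1).foldl
      (fun dp i =>
        let val := PySem.List.pyGetD (pref 0 nums) i 0
        PySem.List.pySetD dp i (PySem.Int.floordiv (val * (val + 1)) 2))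
      (List.replicate (nums.length + 1) 0)
    = (PySem.List.pyRange 0 ((nums.length : Int) + 1) 1).map (fun i => bCost (pref 0 nums) 0 i) := by
  have hP0 : PySem.List.pyGetD (pref 0 nums) 0 0 = 0 := by
    have h0 := PySem.List.pyGetD_natCast (pref 0 nums) 0 (0 : Int)
    push_cast at h0
    rw [h0]
    exact pref_getD_zero 0 nums
  have hcost : ∀ i : Int, bCost (pref 0 nums) 0 i
      = PySem.Int.floordiv (PySem.List.pyGetD (pref 0 nums) i 0 * (PySem.List.pyGetD (pref 0 nums) i 0 + 1)) 2 := by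
    intro i; simp [bCost, hP0]
  have key : ∀ m : Nat, 1 ≤ m → m ≤ nums.length + 1 →
      (PySem.List.pyRange 1 ((m : Nat) : Int) 1).foldl
        (fun dp i =>
          let val := PySem.List.pyGetD (pref 0 nums) i 0
          PySem.List.pySetD dp i (PySem.Int.floordiv (val * (val + 1)) 2))
        (List.replicate (nums.length + 1) 0)
      = (PySem.List.pyRange 0 ((m : Nat) : Int) 1).map (fun i => bCost (pref 0 nums) 0 i)
        ++ List.replicate (nums.length + 1 - m) 0 := by
    intro m h1 h2
    induction m with
    | zero => omega
    | succ m ih =>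
      rcases Nat.lt_or_ge m 1 with h | hm1
      · have hm0 : m = 0 := by omega
        subst hm0
        rw [show ((0 + 1 : Nat) : Int) = 1 by norm_num,
            PySem.List.pyRange_one_eq_nil (by omega), List.foldl_nil,
            show PySem.List.pyRange 0 1 1 = [0] by decide]
        rw [show nums.length + 1 - 1 = nums.length by omega, List.replicate_succ]
        rw [List.map_cons, List.map_nil, hcost 0, hP0]
        norm_num [PySem.Int.floordiv]
      · have hm2 : m ≤ nums.length + 1 := by omega
        have hmn : m ≤ nums.length := by omega
        have ihm := ih hm1 hm2
        have hmap : ((PySem.List.pyRange 0 ((m : Nat) : Int) 1).map (fun i => bCost (pref 0 nums) 0 i)).length = m := by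
          simp [PySem.List.length_pyRange_one]
        have hL : ((PySem.List.pyRange 0 ((m : Nat) : Int) 1).map (fun i => bCost (pref 0 nums) 0 i)
            ++ List.replicate (nums.length + 1 - m) 0).length = nums.length + 1 := by
          rw [List.length_append, hmap, List.length_replicate]; omega
        rw [show ((m + 1 : Nat) : Int) = ((m : Nat) : Int) + 1 by push_cast; ring,
            PySem.List.pyRange_one_succ_right (by exact_mod_cast hm1), List.foldl_append, ihm]
        simp only [List.foldl]
        rw [show ((m : Nat) : Int) = ((m : Nat) : Int) from rfl]
        rw [pySetD_nat _ _ _ (by omega), List.set_append, if_neg (by omega), hmap, Nat.sub_self]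
        have hrep : (List.replicate (nums.length + 1 - m) (0 : Int)).set 0
            (PySem.Int.floordiv (PySem.List.pyGetD (pref 0 nums) ((m : Nat) : Int) 0 * (PySem.List.pyGetD (pref 0 nums) ((m : Nat) : Int) 0 + 1)) 2)
            = PySem.Int.floordiv (PySem.List.pyGetD (pref 0 nums) ((m : Nat) : Int) 0 * (PySem.List.pyGetD (pref 0 nums) ((m : Nat) : Int) 0 + 1)) 2
              :: List.replicate (nums.length + 1 - (m + 1)) 0 := by
          rw [show nums.length + 1 - m = (nums.length + 1 - (m + 1)) + 1 by omega, List.replicate_succ, List.set_cons_zero]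
        rw [hrep, PySem.List.pyRange_one_succ_right (by positivity : (0:Int) ≤ (m : Nat)), List.map_append]
        simp [hcost]
  have h := key (nums.length + 1) (by omega) le_rfl
  have hc : ((nums.length + 1 : Nat) : Int) = ((nums.length : Int) + 1) := by push_cast; ring
  rw [hc] at h
  simpa using h

-- plain running first-minimum (by key) over a list, seeded with b
def mfold (key : Int → Int) (b : Int) : List Int → Int
  | [] => b
  | x :: xs => if key x < key b then mfold key x xs else mfold key b xs

theorem min?_eq_mfold (key : Int → Int) (b : Int) (xs : List Int) :
    PySem.List.min? (b :: xs) key = some (mfold key b xs) := by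
  induction xs generalizing b with
  | nil => rfl
  | cons x xs ih =>
    simp only [PySem.List.min?, List.foldl, mfold] at *
    split_ifs <;> exact ih _

theorem fold_pair (key : Int → Int) (xs : List Int) (b : Int) :
    xs.foldl
      (fun (s : Option Int × Int) i =>
        match s.1 with
        | none => (some (key i), i)
        | some m => if key i < m then (some (key i), i) else s)
      (some (key b), b)
    = (some (key (mfold key b xs)), mfold key b xs) := by
  induction xs generalizing b with
  | nil => rfl
  | cons x xs ih =>
    simp only [List.foldl, mfold]
    split_ifs <;> exact ih _

theorem mfold_mem (key : Int → Int) (b : Int) (xs : List Int) :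
    mfold key b xs = b ∨ mfold key b xs ∈ xs := by
  induction xs generalizing b with
  | nil => simp [mfold]
  | cons x xs ih =>
    simp only [mfold]
    split_ifs
    · rcases ih x with h | h <;> simp [h]
    · rcases ih b with h | h <;> simp [h]

theorem aCompute_gt (P dp nd : List Int) (l r oL oR : Int) (h : l > r) :
    aCompute P dp nd l r oL oR = nd := by
  rw [aCompute]; simp [h]

theorem aCompute_le (P dp nd : List Int) (l r oL oR : Int) (h : ¬ l > r) :
    aCompute P dp nd l r oL oR =
      (let mid := PySem.Int.floordiv (l + r) 2
       let limit := min (mid - 1) oR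
       let st := (PySem.List.pyRange oL (limit + 1) 1).foldl
        (fun (s : Option Int × Int) i =>
          let val := PySem.List.pyGetD P mid 0 - PySem.List.pyGetD P i 0
          let currentScore := PySem.List.pyGetD dp i 0 + PySem.Int.floordiv (val * (val + 1)) 2
          match s.1 with
          | none => (some currentScore, i)
          | some m => if currentScore < m then (some currentScore, i) else s)
        ((none : Option Int), (-1 : Int))
       aCompute P dp (aCompute P dp (PySem.List.pySetD nd mid (st.1.getD 0)) l (mid - 1) oL st.2) (mid + 1) r st.2 oR) := by
  conv_lhs => rw [aCompute]
  simp [h]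

theorem bStack_nil (P dp nd : List Int) : bStack P dp nd [] = nd := by
  rw [bStack]

theorem bStack_cons_gt (P dp nd : List Int) (l r oL oR : Int) (rest : List (Int × Int × Int × Int)) (h : l > r) :
    bStack P dp nd ((l, r, oL, oR) :: rest) = bStack P dp nd rest := by
  conv_lhs => rw [bStack]
  simp [h]

theorem bStack_cons_le (P dp nd : List Int) (l r oL oR : Int) (rest : List (Int × Int × Int × Int)) (h : ¬ l > r) :
    bStack P dp nd ((l, r, oL, oR) :: rest) =
      (let mid := PySem.Int.floordiv (l + r) 2
       let limit := min (mid - 1) oR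
       let best := (PySem.List.min? (PySem.List.pyRange oL (limit + 1) 1)
        (fun l => PySem.List.pyGetD dp l 0 + bCost P l mid)).getD 0
       bStack P dp (PySem.List.pySetD nd mid (PySem.List.pyGetD dp best 0 + bCost P best mid))
         ((l, mid - 1, oL, best) :: (mid + 1, r, best, oR) :: rest)) := by
  conv_lhs => rw [bStack]
  simp [h]

-- the stack loop of B simulates the recursion of A, task by task
theorem bridge (P dp : List Int) (N : Nat) :
    ∀ (l r oL oR : Int) (nd : List Int) (rest : List (Int × Int × Int × Int)),
      (r + 1 - l).toNat ≤ N → oL ≤ l - 1 → oL ≤ oR →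
      bStack P dp nd ((l, r, oL, oR) :: rest) = bStack P dp (aCompute P dp nd l r oL oR) rest := by
  induction N with
  | zero =>
    intro l r oL oR nd rest hN h1 h2
    have hlr : l > r := by omega
    rw [bStack_cons_gt _ _ _ _ _ _ _ _ hlr, aCompute_gt _ _ _ _ _ _ _ hlr]
  | succ N ih =>
    intro l r oL oR nd rest hN h1 h2
    by_cases hlr : l > r
    · rw [bStack_cons_gt _ _ _ _ _ _ _ _ hlr, aCompute_gt _ _ _ _ _ _ _ hlr]
    · have hlr' : l ≤ r := by omega
      have hmid := PySem.Int.floordiv_two_mid_bounds hlr'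
      rw [bStack_cons_le _ _ _ _ _ _ _ _ hlr, aCompute_le _ _ _ _ _ _ _ hlr]
      simp only []
      set mid := PySem.Int.floordiv (l + r) 2 with hmiddef
      set limit := min (mid - 1) oR with hlim
      set key : Int → Int := fun i =>
        PySem.List.pyGetD dp i 0 +
          PySem.Int.floordiv ((PySem.List.pyGetD P mid 0 - PySem.List.pyGetD P i 0) *
            ((PySem.List.pyGetD P mid 0 - PySem.List.pyGetD P i 0) + 1)) 2 with hkey
      have hol : oL ≤ limit := by omega
      have hrange : PySem.List.pyRange oL (limit + 1) 1 = oL :: PySem.List.pyRange (oL + 1) (limit + 1) 1 :=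
        PySem.List.pyRange_one_cons (by omega)
      set best := mfold key oL (PySem.List.pyRange (oL + 1) (limit + 1) 1) with hbest
      have hbm := mfold_mem key oL (PySem.List.pyRange (oL + 1) (limit + 1) 1)
      rw [← hbest] at hbm
      have hb1 : oL ≤ best := by
        rcases hbm with h | h
        · omega
        · have := (PySem.List.mem_pyRange_one).1 h; omega
      have hb2 : best ≤ limit := by
        rcases hbm with h | h
        · omega
        · have := (PySem.List.mem_pyRange_one).1 h; omega
      have hfoldA : (PySem.List.pyRange oL (limit + 1) 1).foldl
          (fun (s : Option Int × Int) i =>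
            let val := PySem.List.pyGetD P mid 0 - PySem.List.pyGetD P i 0
            let currentScore := PySem.List.pyGetD dp i 0 + PySem.Int.floordiv (val * (val + 1)) 2
            match s.1 with
            | none => (some currentScore, i)
            | some m => if currentScore < m then (some currentScore, i) else s)
          ((none : Option Int), (-1 : Int))
          = (some (key best), best) := by
        rw [hrange, List.foldl_cons]
        exact fold_pair key (PySem.List.pyRange (oL + 1) (limit + 1) 1) oL
      have hkeyB : (fun j => PySem.List.pyGetD dp j 0 + bCost P j mid) = key := by
        funext j; simp [bCost, hkey]
      have hminB : ((PySem.List.min? (PySem.List.pyRange oL (limit + 1) 1)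
          (fun j => PySem.List.pyGetD dp j 0 + bCost P j mid)).getD 0) = best := by
        rw [hrange, hkeyB, min?_eq_mfold]
        rfl
      rw [hfoldA, hminB]
      have hval : PySem.List.pyGetD dp best 0 + bCost P best mid = (some (key best)).getD 0 := by
        simp [bCost, hkey]
      rw [hval]
      rw [ih l (mid - 1) oL best _ _ (by omega) h1 hb1]
      rw [ih (mid + 1) r best oR _ _ (by omega) (by omega) (by omega)]

theorem roundStep (P dp : List Int) (n : Nat) (i : Int) :
    aCompute P dp (List.replicate (n + 1) 0) i (n : Int) (i - 1) ((n : Int) - 1)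
    = bStack P dp (List.replicate (n + 1) 0) [(i, (n : Int), i - 1, (n : Int) - 1)] := by
  by_cases hi : i > (n : Int)
  · rw [aCompute_gt _ _ _ _ _ _ _ hi, bStack_cons_gt _ _ _ _ _ _ _ _ hi, bStack_nil]
  · have h := bridge P dp ((n : Int) + 1 - i).toNat i (n : Int) (i - 1) ((n : Int) - 1)
      (List.replicate (n + 1) 0) [] le_rfl (by omega) (by omega)
    rw [h, bStack_nil]

-- ===== VERDICT (by name: the statement is the Claim_ definition above) =====
theorem minPartitionScore_spec : Claim_equal_minPartitionScore := by
  intro nums k _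
  unfold Spec_minPartitionScore minPartitionScore minPartitionScore_alt
  simp only [aPrefix_eq, bPrefix_eq, base_eq]
  rw [PySem.List.foldl_congr_mem (PySem.List.pyRange 2 (k + 1) 1)
      (fun dp i => aCompute (pref 0 nums) dp (List.replicate (nums.length + 1) 0) i (nums.length : Int) (i - 1) ((nums.length : Int) - 1))
      (fun dp j => bStack (pref 0 nums) dp (List.replicate (nums.length + 1) 0) [(j, (nums.length : Int), j - 1, (nums.length : Int) - 1)])
      _ (fun acc x _ => roundStep (pref 0 nums) acc nums.length x)]
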